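-- pv_equiv track=rewrite | github.com/tusharpangare/competitive-programming | leetcode/fraction_to_decimal.py | find_repeating_pattern
-- ===== SOURCE A (Python) =====
-- def find_repeating_pattern(st):
--     trailing_to_pattern = ""
--     while len(st) >=1:
--         for i in range(1, (len(st) // 2) + 1):
--             if st[:i] == st[i:i + len(st[:i])]:
--                 return f"{trailing_to_pattern}({(st[:i])})"
--         trailing_to_pattern += st[0]
--         st = st[1:]
--     return trailing_to_pattern
-- ===== SOURCE B (Python) =====
-- def find_repeating_pattern(st):
--     n = len(st)
--     best = None  # (start j, period i) minimizing (j, i) lexicographically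
--     for i in range(1, n // 2 + 1):
--         # smallest j with st[j:j+i] == st[j+i:j+2*i], found by a right-to-left
--         # streak scan over single-character match positions (O(n) per period)
--         streak = 0
--         found = None
--         for k in range(n - i - 1, -1, -1):
--             streak = streak + 1 if st[k] == st[k + i] else 0
--             if streak >= i:
--                 found = k
--         if found is not None and (best is None or found < best[0]):
--             best = (found, i)
--     if best is None:
--         return st
--     j, i = best
--     return st[:j] + "(" + st[j:j + i] + ")"
-- ===== Notes on version B (the rewrite author's own statement) =====
-- stated objective: alternative
-- what changed: B inverts the loop nest: instead of scanning suffixes and re-comparing slices of every period per suffix, it iterates over candidate periods and finds the leftmost square of each period with a right-to-left streak scan over single-character match positions, then takes the lexicographically first (position, period) pair.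
import Mathlib
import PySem

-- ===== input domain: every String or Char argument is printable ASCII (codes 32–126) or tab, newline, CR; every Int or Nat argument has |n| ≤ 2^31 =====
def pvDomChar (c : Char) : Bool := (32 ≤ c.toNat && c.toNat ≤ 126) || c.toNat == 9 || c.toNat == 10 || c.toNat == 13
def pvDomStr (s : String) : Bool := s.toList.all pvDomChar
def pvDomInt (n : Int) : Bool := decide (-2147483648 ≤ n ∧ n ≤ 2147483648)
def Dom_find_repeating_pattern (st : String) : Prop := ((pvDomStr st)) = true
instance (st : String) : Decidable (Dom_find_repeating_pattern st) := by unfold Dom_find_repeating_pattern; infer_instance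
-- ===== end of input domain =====

-- B inverts the loop nest: instead of A's scan over suffixes with a quadratic slice
-- comparison per suffix (O(n^3) worst case), B iterates over candidate periods and finds
-- the leftmost square of each period by a linear right-to-left streak scan over
-- single-character match positions (O(n^2) worst case); objective: alternative.


-- ===== PORT A =====
-- inner 'for i in range(1, len(st)//2 + 1): if st[:i] == st[i:i+len(st[:i])]: return i'
-- (for i ≤ len/2, len(st[:i]) = i and the slices are take/drop, exact)
def findA_inner (s : List Char) (i : Nat) : Option Nat :=
  if _h : i ≤ s.length / 2 then
    if s.take i = (s.drop i).take i then some i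
    else findA_inner s (i + 1)
  else none
termination_by s.length / 2 + 1 - i

-- the 'while len(st) >= 1' loop, accumulating trailing_to_pattern
def findA_loop (t : List Char) (s : List Char) : List Char :=
  match s with
  | [] => t
  | c :: rest =>
    match findA_inner (c :: rest) 1 with
    | some i => t ++ '(' :: ((c :: rest).take i ++ [')'])
    | none => findA_loop (t ++ [c]) rest

def find_repeating_pattern (st : String) : String :=
  String.ofList (findA_loop [] st.toList)

-- ===== PORT B =====
-- st[k] == st[k+i]  (both indices are in range at every call site)
def mB (s : List Char) (i k : Nat) : Bool := s.getD k ' ' == s.getD (k + i) ' '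

-- 'for k in range(n-i-1, -1, -1): streak = streak+1 if st[k]==st[k+i] else 0; if streak >= i: found = k'
def scanB (s : List Char) (i : Nat) : Nat → Nat → Option Nat → Option Nat
  | k, streak, found =>
    let streak' := if mB s i k then streak + 1 else 0
    let found' := if i ≤ streak' then some k else found
    match k with
    | 0 => found'
    | k' + 1 => scanB s i k' streak' found'

def findB_scan (s : List Char) (i : Nat) : Option Nat :=
  if s.length ≤ i then none else scanB s i (s.length - i - 1) 0 none

-- 'if found is not None and (best is None or found < best[0]): best = (found, i)'
def stepB (s : List Char) (best : Option (Nat × Nat)) (i : Nat) : Option (Nat × Nat) :=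
  match findB_scan s i, best with
  | none, _ => best
  | some j, none => some (j, i)
  | some j, some (bj, bi) => if j < bj then some (j, i) else some (bj, bi)

-- 'for i in range(1, n//2 + 1)'
def findB_best (s : List Char) : Option (Nat × Nat) :=
  (List.range' 1 (s.length / 2)).foldl (stepB s) none

def find_repeating_pattern_alt (st : String) : String :=
  match findB_best st.toList with
  | none => st
  | some (j, i) =>
    String.ofList (st.toList.take j ++ '(' :: ((st.toList.drop j).take i ++ [')']))

-- ===== PRECONDITION & SPEC =====
def Spec_find_repeating_pattern (st : String) (out : String) : Prop := out = find_repeating_pattern_alt st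
instance (st : String) (out : String) : Decidable (Spec_find_repeating_pattern st out) := by unfold Spec_find_repeating_pattern; infer_instance

-- ===== CLAIM (what is proved, stated in full; the proofs are below) =====
def Claim_equal_find_repeating_pattern : Prop := ∀ (st : String), Dom_find_repeating_pattern st → Spec_find_repeating_pattern st (find_repeating_pattern st)

-- ===== LEMMAS AND PROOFS =====

-- 'there is a square of period i at position j' (1 ≤ i, j + 2*i ≤ |s|, chars match pointwise)
def good (s : List Char) (j i : Nat) : Prop :=
  1 ≤ i ∧ j + 2 * i ≤ s.length ∧ ∀ t < i, s.getD (j + t) ' ' = s.getD (j + i + t) ' '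

theorem good_le_half (s : List Char) (j i : Nat) (h : good s j i) : i ≤ s.length / 2 := by
  obtain ⟨-, h2, -⟩ := h; omega

-- A's slice comparison on the suffix at j says exactly 'good s j i'
theorem chk_iff_good (s : List Char) (j i : Nat) (hi : 1 ≤ i) (h2 : 2 * i ≤ (s.drop j).length) :
    ((s.drop j).take i = ((s.drop j).drop i).take i) ↔ good s j i := by
  have hlen : j + 2 * i ≤ s.length := by
    simp only [List.length_drop] at h2; omega
  have hd : (s.drop j).drop i = s.drop (j + i) := by
    rw [List.drop_drop, Nat.add_comm]
  rw [hd]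
  constructor
  · intro he
    refine ⟨hi, hlen, fun t ht => ?_⟩
    have h1 : j + t < s.length := by omega
    have h2' : j + i + t < s.length := by omega
    have hq := congrArg (fun l => l[t]?) he
    simp only [List.getElem?_take, ht, if_pos, List.getElem?_drop] at hq
    rw [List.getD_eq_getElem?_getD, List.getD_eq_getElem?_getD, hq]
  · rintro ⟨-, hlen2, hp⟩
    apply List.ext_getElem?
    intro t
    by_cases ht : t < i
    · have h1 : j + t < s.length := by omega
      have h2' : j + i + t < s.length := by omega
      simp only [List.getElem?_take, ht, if_pos, List.getElem?_drop]
      have hp' := hp t ht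
      rw [List.getD_eq_getElem _ _ h1, List.getD_eq_getElem _ _ h2'] at hp'
      rw [List.getElem?_eq_getElem h1, List.getElem?_eq_getElem h2', hp']
    · simp [ht]

theorem innerA_none_iff (u : List Char) (i0 : Nat) :
    findA_inner u i0 = none ↔ ∀ i, i0 ≤ i → i ≤ u.length / 2 → u.take i ≠ (u.drop i).take i := by
  fun_induction findA_inner u i0 with
  | case1 i0 h1 h2 =>
    constructor
    · intro h; simp at h
    · intro hall; exact absurd h2 (hall i0 le_rfl h1)
  | case2 i0 h1 h2 ih =>
    rw [ih]
    constructor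
    · intro hall i hle hhalf
      rcases Nat.eq_or_lt_of_le hle with rfl | hlt
      · exact h2
      · exact hall i hlt hhalf
    · intro hall i hle hhalf
      exact hall i (by omega) hhalf
  | case3 i0 h1 =>
    simp only [true_iff]
    intro i hle hhalf
    omega

theorem innerA_some_iff (u : List Char) (i0 i : Nat) :
    findA_inner u i0 = some i ↔
      (i0 ≤ i ∧ i ≤ u.length / 2 ∧ u.take i = (u.drop i).take i ∧
        ∀ i', i0 ≤ i' → i' < i → u.take i' ≠ (u.drop i').take i') := by
  fun_induction findA_inner u i0 with
  | case1 i0 h1 h2 =>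
    constructor
    · rintro h
      obtain rfl : i0 = i := by simpa using h
      exact ⟨le_rfl, h1, h2, fun i' h1' h2' => absurd h2' (by omega)⟩
    · rintro ⟨hle, hhalf, hchk, hmin⟩
      rcases Nat.eq_or_lt_of_le hle with rfl | hlt
      · rfl
      · exact absurd h2 (hmin i0 le_rfl hlt)
  | case2 i0 h1 h2 ih =>
    rw [ih]
    constructor
    · rintro ⟨hle, hhalf, hchk, hmin⟩
      refine ⟨by omega, hhalf, hchk, fun i' h1' h2' => ?_⟩
      rcases Nat.eq_or_lt_of_le h1' with rfl | hlt
      · exact h2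
      · exact hmin i' (by omega) h2'
    · rintro ⟨hle, hhalf, hchk, hmin⟩
      have hne : i0 ≠ i := by rintro rfl; exact h2 hchk
      exact ⟨by omega, hhalf, hchk, fun i' h1' h2' => hmin i' (by omega) h2'⟩
  | case3 i0 h1 =>
    constructor
    · intro h; simp at h
    · rintro ⟨hle, hhalf, -, -⟩
      exact absurd hhalf (by omega)

theorem good_cons (c : Char) (s : List Char) (j i : Nat) :
    good (c :: s) (j + 1) i ↔ good s j i := by
  unfold good
  simp only [List.length_cons]
  constructor
  · rintro ⟨h1, h2, h3⟩
    refine ⟨h1, by omega, fun t ht => ?_⟩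
    have h := h3 t ht
    rw [show j + 1 + t = (j + t) + 1 by omega, show j + 1 + i + t = (j + i + t) + 1 by omega,
      List.getD_cons_succ, List.getD_cons_succ] at h
    exact h
  · rintro ⟨h1, h2, h3⟩
    refine ⟨h1, by omega, fun t ht => ?_⟩
    rw [show j + 1 + t = (j + t) + 1 by omega, show j + 1 + i + t = (j + i + t) + 1 by omega,
      List.getD_cons_succ, List.getD_cons_succ]
    exact h3 t ht

theorem good_of_chk (s : List Char) (i : Nat) (hi : 1 ≤ i) (hhalf : i ≤ s.length / 2)
    (hchk : s.take i = (s.drop i).take i) : good s 0 i := by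
  have := (chk_iff_good s 0 i hi (by simp; omega)).1 (by simpa using hchk)
  exact this

theorem chk_of_good (s : List Char) (i : Nat) (hg : good s 0 i) :
    s.take i = (s.drop i).take i := by
  have h2 := hg.2.1
  have := (chk_iff_good s 0 i hg.1 (by simp; omega)).2 hg
  simpa using this

theorem A_none (s : List Char) (h : ∀ j i, ¬ good s j i) : ∀ t, findA_loop t s = t ++ s := by
  induction s with
  | nil => intro t; simp [findA_loop]
  | cons c rest ih =>
    intro t
    have hinner : findA_inner (c :: rest) 1 = none := by
      rw [innerA_none_iff]
      intro i h1i hhalf hchk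
      exact h 0 i (good_of_chk _ i h1i hhalf hchk)
    have hrec := ih (fun j i hg => h (j + 1) i ((good_cons c rest j i).2 hg)) (t ++ [c])
    simp only [findA_loop, hinner]
    rw [hrec]
    simp

theorem A_some (s : List Char) : ∀ (j i : Nat) (t : List Char), good s j i →
    (∀ j', j' < j → ∀ i', ¬ good s j' i') → (∀ i', i' < i → ¬ good s j i') →
    findA_loop t s = t ++ s.take j ++ '(' :: ((s.drop j).take i ++ [')']) := by
  induction s with
  | nil =>
    intro j i t hg _ _
    obtain ⟨h1, h2, -⟩ := hg
    simp only [List.length_nil] at h2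
    omega
  | cons c rest ih =>
    intro j i t hg hminj hmini
    match j with
    | 0 =>
      have hinner : findA_inner (c :: rest) 1 = some i := by
        rw [innerA_some_iff]
        refine ⟨hg.1, good_le_half _ 0 i hg, chk_of_good _ i hg, fun i' h1' h2' hchk => ?_⟩
        exact hmini i' h2' (good_of_chk _ i' h1' (by
          have : i ≤ (c :: rest).length / 2 := good_le_half _ 0 i hg
          omega) hchk)
      simp only [findA_loop, hinner]
      simp
    | j' + 1 =>
      have hinner : findA_inner (c :: rest) 1 = none := by
        rw [innerA_none_iff]
        intro i'' h1'' hhalf'' hchk''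
        exact hminj 0 (by omega) i'' (good_of_chk _ i'' h1'' hhalf'' hchk'')
      have hrec := ih j' i (t ++ [c]) ((good_cons c rest j' i).1 hg)
        (fun j'' hj'' i'' hg'' => hminj (j'' + 1) (by omega) i'' ((good_cons c rest j'' i'').2 hg''))
        (fun i'' hi'' hg'' => hmini i'' hi'' ((good_cons c rest j' i'').2 hg''))
      simp only [findA_loop, hinner]
      rw [hrec]
      simp

-- length of the run of matches at lag i starting at k
def runB (s : List Char) (i k : Nat) : Nat :=
  if _h : k + i < s.length ∧ mB s i k = true then runB s i (k + 1) + 1 else 0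
termination_by s.length - k
decreasing_by omega

theorem runB_unfold (s : List Char) (i k : Nat) :
    runB s i k = if k + i < s.length ∧ mB s i k = true then runB s i (k + 1) + 1 else 0 := by
  rw [runB]
  split <;> simp_all

theorem run_ge_iff (s : List Char) (i : Nat) :
    ∀ m k, m ≤ runB s i k ↔ ∀ t < m, (k + t + i < s.length ∧ mB s i (k + t) = true) := by
  intro m
  induction m with
  | zero => intro k; simp
  | succ m ih =>
    intro k
    rw [runB_unfold]
    by_cases h : k + i < s.length ∧ mB s i k = true
    · rw [if_pos h]
      constructor
      · intro hm t ht
        match t with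
        | 0 => simpa using h
        | t' + 1 =>
          have := (ih (k + 1)).1 (by omega) t' (by omega)
          constructor
          · omega
          · rw [show k + (t' + 1) = (k + 1) + t' by omega]
            exact this.2
      · intro hall
        have : m ≤ runB s i (k + 1) := (ih (k + 1)).2 (fun t ht => by
          have := hall (t + 1) (by omega)
          refine ⟨by omega, ?_⟩
          rw [show (k + 1) + t = k + (t + 1) by omega]
          exact this.2)
        omega
    · rw [if_neg h]
      constructor
      · intro hm; omega
      · intro hall
        exact absurd (by simpa using hall 0 (by omega)) h

theorem good_iff_run (s : List Char) (j i : Nat) :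
    good s j i ↔ (1 ≤ i ∧ i ≤ runB s i j) := by
  constructor
  · rintro ⟨h1, h2, h3⟩
    refine ⟨h1, (run_ge_iff s i i j).2 (fun t ht => ⟨by omega, ?_⟩)⟩
    simp only [mB, beq_iff_eq]
    rw [show j + t + i = j + i + t by omega]
    exact h3 t ht
  · rintro ⟨h1, h2⟩
    have hall := (run_ge_iff s i i j).1 h2
    have hb := hall (i - 1) (by omega)
    refine ⟨h1, by omega, fun t ht => ?_⟩
    have hm := (hall t ht).2
    simp only [mB, beq_iff_eq] at hm
    rw [show j + i + t = j + t + i by omega]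
    exact hm

theorem scanB_zero (s : List Char) (i streak : Nat) (found : Option Nat) :
    scanB s i 0 streak found =
      (if i ≤ (if mB s i 0 then streak + 1 else 0) then some 0 else found) := rfl

theorem scanB_succ (s : List Char) (i k streak : Nat) (found : Option Nat) :
    scanB s i (k + 1) streak found =
      scanB s i k (if mB s i (k + 1) then streak + 1 else 0)
        (if i ≤ (if mB s i (k + 1) then streak + 1 else 0) then some (k + 1) else found) := rfl

theorem streak_step (s : List Char) (i k : Nat) (hk : k + i < s.length) :
    (if mB s i k then runB s i (k + 1) + 1 else 0) = runB s i k := by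
  rw [runB_unfold s i k]
  by_cases h : mB s i k = true
  · simp [h, hk]
  · simp [h]

theorem scanB_eq (s : List Char) (i : Nat) :
    ∀ k, k + i < s.length → ∀ found,
      scanB s i k (runB s i (k + 1)) found =
        ((List.range (k + 1)).find? (fun j => decide (i ≤ runB s i j))).or found := by
  intro k
  induction k with
  | zero =>
    intro hk found
    rw [scanB_zero, streak_step s i 0 hk]
    rw [List.range_one]
    by_cases h0 : i ≤ runB s i 0 <;> simp [List.find?_nil, h0]
  | succ k ih =>
    intro hk found
    rw [scanB_succ, streak_step s i (k + 1) hk]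
    rw [ih (by omega)]
    conv_rhs => rw [List.range_succ, List.find?_append]
    rw [Option.or_assoc]
    have hone : List.find? (fun j => decide (i ≤ runB s i j)) [k + 1]
        = if i ≤ runB s i (k + 1) then some (k + 1) else none := by
      by_cases h1 : i ≤ runB s i (k + 1) <;> simp [h1]
    rw [hone]
    by_cases h1 : i ≤ runB s i (k + 1)
    · rw [if_pos h1, if_pos h1, Option.some_or]
    · rw [if_neg h1, if_neg h1, Option.none_or]

theorem find?_range_some (n : Nat) (p : Nat → Bool) :
    ∀ j, (List.range n).find? p = some j ↔ (j < n ∧ p j = true ∧ ∀ j' < j, p j' = false) := by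
  induction n with
  | zero => simp
  | succ n ih =>
    intro j
    rw [List.range_succ, List.find?_append]
    rcases hf : (List.range n).find? p with _ | j0
    · have hnone : ∀ j' < n, p j' = false := by
        intro j' hj'
        have := List.find?_eq_none.1 hf j' (List.mem_range.2 hj')
        simpa using this
      simp only [Option.none_or]
      constructor
      · intro h
        rcases hpn : p n with _ | _
        · simp [List.find?_nil, hpn] at h
        · simp only [List.find?_cons, hpn] at h
          obtain rfl : n = j := by simpa using h
          exact ⟨by omega, hpn, hnone⟩
      · rintro ⟨hjn, hpj, hmin⟩
        have hj : j = n := by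
          by_contra hne
          have hlt : j < n := by omega
          have := hnone j hlt
          rw [hpj] at this; cases this
        subst hj
        simp [hpj]
    · have h0 := (ih j0).1 hf
      simp only [Option.some_or]
      constructor
      · intro h
        obtain rfl : j0 = j := by simpa using h
        exact ⟨by omega, h0.2.1, h0.2.2⟩
      · rintro ⟨hjn, hpj, hmin⟩
        simp only [Option.some.injEq]
        by_contra hne
        rcases Nat.lt_or_ge j0 j with hlt | hge
        · have hc := hmin j0 hlt; rw [h0.2.1] at hc; cases hc
        · have hlt : j < j0 := by omega
          have hc := h0.2.2 j hlt; rw [hpj] at hc; cases hc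

theorem scan_eq_find? (s : List Char) (i : Nat) (hn : i < s.length) :
    findB_scan s i = (List.range (s.length - i)).find? (fun j => decide (i ≤ runB s i j)) := by
  unfold findB_scan
  rw [if_neg (by omega)]
  have h0 : runB s i (s.length - i) = 0 := by
    rw [runB_unfold, if_neg]
    rintro ⟨h1, -⟩
    omega
  have h := scanB_eq s i (s.length - i - 1) (by omega) none
  rw [show s.length - i - 1 + 1 = s.length - i by omega, h0, Option.or_none] at h
  exact h

theorem scan_none_iff (s : List Char) (i : Nat) (hi : 1 ≤ i) (hn : i < s.length) :
    findB_scan s i = none ↔ ∀ j, ¬ good s j i := by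
  rw [scan_eq_find? s i hn]
  constructor
  · intro h j hg
    have hj : j < s.length - i := by
      obtain ⟨-, h2, -⟩ := hg; omega
    have hx := List.find?_eq_none.1 h j (List.mem_range.2 hj)
    rw [good_iff_run] at hg
    simp only [decide_eq_true_eq] at hx
    exact hx hg.2
  · intro h
    apply List.find?_eq_none.2
    intro j _
    simp only [decide_eq_true_eq]
    intro hle
    exact h j ((good_iff_run s j i).2 ⟨hi, hle⟩)

theorem scan_some_iff (s : List Char) (i : Nat) (hi : 1 ≤ i) (hn : i < s.length) (j : Nat) :
    findB_scan s i = some j ↔ (good s j i ∧ ∀ j' < j, ¬ good s j' i) := by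
  rw [scan_eq_find? s i hn, find?_range_some _ _ j]
  constructor
  · rintro ⟨hjn, hpj, hmin⟩
    have hg : good s j i := (good_iff_run s j i).2 ⟨hi, by simpa using hpj⟩
    refine ⟨hg, fun j' hj' hg' => ?_⟩
    have hx := hmin j' hj'
    rw [good_iff_run] at hg'
    simp only [decide_eq_false_iff_not] at hx
    exact hx hg'.2
  · rintro ⟨hg, hmin⟩
    have hj : j < s.length - i := by
      obtain ⟨-, h2, -⟩ := hg; omega
    refine ⟨hj, by simpa using ((good_iff_run s j i).1 hg).2, fun j' hj' => ?_⟩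
    simp only [decide_eq_false_iff_not]
    intro hle
    exact hmin j' hj' ((good_iff_run s j' i).2 ⟨hi, hle⟩)

theorem fold_best (s : List Char) : ∀ m, 2 * m ≤ s.length →
    (((List.range' 1 m).foldl (stepB s) none = none → ∀ j i, 1 ≤ i → i ≤ m → ¬ good s j i)
     ∧ (∀ j i, (List.range' 1 m).foldl (stepB s) none = some (j, i) →
         (1 ≤ i ∧ i ≤ m ∧ good s j i ∧
          ∀ j' i', 1 ≤ i' → i' ≤ m → good s j' i' → (j < j' ∨ (j = j' ∧ i ≤ i'))))) := by
  intro m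
  induction m with
  | zero =>
    intro _
    constructor
    · intro _ j i h1 h2 _
      omega
    · intro j i h
      simp [List.range'] at h
  | succ m ih =>
    intro hm
    obtain ⟨ihn, ihs⟩ := ih (by omega)
    have hrange : List.range' 1 (m + 1) = List.range' 1 m ++ [1 + m] := by
      simpa using List.range'_concat (s := 1) (n := m) (step := 1)
    have hfold : (List.range' 1 (m + 1)).foldl (stepB s) none
        = stepB s ((List.range' 1 m).foldl (stepB s) none) (m + 1) := by
      rw [hrange, List.foldl_append, show 1 + m = m + 1 by omega]
      rfl
    have hi1 : 1 ≤ m + 1 := by omega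
    have hnlen : m + 1 < s.length := by omega
    rcases hscan : findB_scan s (m + 1) with _ | j1
    · have hnogood : ∀ j, ¬ good s j (m + 1) := (scan_none_iff s (m + 1) hi1 hnlen).1 hscan
      have hstep : stepB s ((List.range' 1 m).foldl (stepB s) none) (m + 1)
          = (List.range' 1 m).foldl (stepB s) none := by
        simp [stepB, hscan]
      rw [hfold, hstep]
      constructor
      · intro hnone j i h1 h2 hg
        rcases Nat.lt_or_ge i (m + 1) with hlt | hge
        · exact ihn hnone j i h1 (by omega) hg
        · obtain rfl : i = m + 1 := by omega
          exact hnogood j hg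
      · intro j i hsome
        obtain ⟨p1, p2, p3, p4⟩ := ihs j i hsome
        refine ⟨p1, by omega, p3, fun j' i' q1 q2 qg => ?_⟩
        rcases Nat.lt_or_ge i' (m + 1) with hlt | hge
        · exact p4 j' i' q1 (by omega) qg
        · obtain rfl : i' = m + 1 := by omega
          exact absurd qg (hnogood j')
    · obtain ⟨hg1, hmin1⟩ := (scan_some_iff s (m + 1) hi1 hnlen j1).1 hscan
      rcases hp : (List.range' 1 m).foldl (stepB s) none with _ | ⟨bj, bi⟩
      · have hstep : stepB s ((List.range' 1 m).foldl (stepB s) none) (m + 1)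
            = some (j1, m + 1) := by
          simp [stepB, hscan, hp]
        rw [hfold, hstep]
        constructor
        · intro h; simp at h
        · intro j i hsome
          obtain ⟨rfl, rfl⟩ : j1 = j ∧ m + 1 = i := by simpa using hsome
          refine ⟨by omega, le_rfl, hg1, fun j' i' q1 q2 qg => ?_⟩
          rcases Nat.lt_or_ge i' (m + 1) with hlt | hge
          · exact absurd qg (ihn hp j' i' q1 (by omega))
          · obtain rfl : i' = m + 1 := by omega
            rcases Nat.lt_trichotomy j1 j' with h | h | h
            · exact Or.inl h
            · exact Or.inr ⟨h, le_rfl⟩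
            · exact absurd qg (hmin1 j' h)
      · obtain ⟨p1, p2, p3, p4⟩ := ihs bj bi hp
        by_cases hlt : j1 < bj
        · have hstep : stepB s ((List.range' 1 m).foldl (stepB s) none) (m + 1)
              = some (j1, m + 1) := by
            simp [stepB, hscan, hp, hlt]
          rw [hfold, hstep]
          constructor
          · intro h; simp at h
          · intro j i hsome
            obtain ⟨rfl, rfl⟩ : j1 = j ∧ m + 1 = i := by simpa using hsome
            refine ⟨by omega, le_rfl, hg1, fun j' i' q1 q2 qg => ?_⟩
            rcases Nat.lt_or_ge i' (m + 1) with hl | hge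
            · rcases p4 j' i' q1 (by omega) qg with h | ⟨heq, -⟩
              · exact Or.inl (by omega)
              · exact Or.inl (by omega)
            · obtain rfl : i' = m + 1 := by omega
              rcases Nat.lt_trichotomy j1 j' with h | h | h
              · exact Or.inl h
              · exact Or.inr ⟨h, le_rfl⟩
              · exact absurd qg (hmin1 j' h)
        · have hstep : stepB s ((List.range' 1 m).foldl (stepB s) none) (m + 1)
              = some (bj, bi) := by
            simp [stepB, hscan, hp, hlt]
          rw [hfold, hstep]
          constructor
          · intro h; simp at h
          · intro j i hsome
            obtain ⟨rfl, rfl⟩ : bj = j ∧ bi = i := by simpa using hsome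
            refine ⟨p1, by omega, p3, fun j' i' q1 q2 qg => ?_⟩
            rcases Nat.lt_or_ge i' (m + 1) with hl | hge
            · exact p4 j' i' q1 (by omega) qg
            · obtain rfl : i' = m + 1 := by omega
              have hj1 : j1 ≤ j' := by
                by_contra hc
                exact (hmin1 j' (by omega)) qg
              rcases Nat.lt_or_ge bj j' with h | h
              · exact Or.inl h
              · exact Or.inr ⟨by omega, by omega⟩

-- ===== VERDICT (by name: the statement is the Claim_ definition above) =====
theorem find_repeating_pattern_spec : Claim_equal_find_repeating_pattern := by
  intro st _
  unfold Spec_find_repeating_pattern find_repeating_pattern find_repeating_pattern_alt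
  obtain ⟨hn, hsome⟩ := fold_best st.toList (st.toList.length / 2) (by omega)
  rcases hb : findB_best st.toList with _ | ⟨j, i⟩
  · unfold findB_best at hb
    have hnog : ∀ j i, ¬ good st.toList j i := by
      intro j i hg
      exact hn hb j i hg.1 (good_le_half _ j i hg) hg
    rw [A_none st.toList hnog []]
    simp
  · unfold findB_best at hb
    obtain ⟨p1, p2, p3, p4⟩ := hsome j i hb
    have hrw := A_some st.toList j i [] p3
      (fun j' hj' i' hg' => by
        rcases p4 j' i' hg'.1 (good_le_half _ j' i' hg') hg' with h | ⟨h, -⟩ <;> omega)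
      (fun i' hi' hg' => by
        rcases p4 j i' hg'.1 (good_le_half _ j i' hg') hg' with h | ⟨-, h⟩ <;> omega)
    rw [hrw]
    simp
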